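-- pv_equiv track=rewrite | github.com/ELokhorst/AdventOfCode | 2024/day19.py | is_partition_possible
-- ===== SOURCE A (Python) =====
-- def is_partition_possible(s: str, patterns: set) -> int:
--     def count_partitions(start, memo):
--         if start == len(s):
--             return 1
--         if start in memo:
--             return memo[start]
--
--         total_count = 0
--         for end in range(start + 1, len(s) + 1):
--             substring = s[start:end]
--             if substring in patterns:
--                 total_count += count_partitions(end, memo)
--
--         memo[start] = total_count
--         return total_count
--
--     memo = {}
--     return count_partitions(0, memo)
-- ===== SOURCE B (Python) =====
-- def is_partition_possible(s, patterns):
--     n = len(s)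
--     dp = [0] * (n + 1)
--     dp[n] = 1
--     for i in reversed(range(n)):
--         dp[i] = sum(dp[end] for end in range(i + 1, n + 1) if s[i:end] in patterns)
--     return dp[0]
-- ===== Notes on version B (the rewrite author's own statement) =====
-- stated objective: alternative
-- what changed: Replaced the top-down memoized recursion with a bottom-up DP array filled back-to-front (dp[i] = ways to partition the suffix s[i:]), eliminating recursion and the memo dict.
import Mathlib
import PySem

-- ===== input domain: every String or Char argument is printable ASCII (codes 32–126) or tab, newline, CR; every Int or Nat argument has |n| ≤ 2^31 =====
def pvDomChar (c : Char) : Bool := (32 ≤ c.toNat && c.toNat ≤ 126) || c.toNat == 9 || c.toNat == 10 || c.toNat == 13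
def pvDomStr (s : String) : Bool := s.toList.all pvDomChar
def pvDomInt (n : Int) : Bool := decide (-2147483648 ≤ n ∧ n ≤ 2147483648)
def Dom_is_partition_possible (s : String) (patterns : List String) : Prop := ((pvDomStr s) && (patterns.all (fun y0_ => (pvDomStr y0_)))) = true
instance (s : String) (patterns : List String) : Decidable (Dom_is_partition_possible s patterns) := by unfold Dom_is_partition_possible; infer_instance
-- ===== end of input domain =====

-- B replaces A's top-down memoized recursion by a bottom-up DP array filled back-to-front
-- (dp[i] = number of ways to partition the suffix s[i:]); same exact return value (objective: alternative).

-- shared one-liner: the membership test `s[start:end] in patterns` both Pythons perform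
def pvCond (s : String) (P : List String) (i e : Nat) : Bool :=
  P.contains (PySem.Str.slice s (some (i : Int)) (some (e : Int)))

-- ===== PORT A =====
-- count_partitions(start, memo), state-threaded; the fuel argument only bounds the recursion
-- depth (len(s)+1 suffices since `start` strictly increases along any call chain); `start`/`end`
-- are Python ints that are provably natural here, ported as Nat carrying the same values.
def pvCountA (s : String) (P : List String) : Nat → Nat → PySem.Dict Nat Int → Int × PySem.Dict Nat Int
  | 0, _, memo => (0, memo)   -- unreachable with the initial fuel
  | fuel+1, start, memo =>
    if start = s.toList.length then (1, memo)
    else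
      match memo.get? start with
      | some v => (v, memo)
      | none =>
        -- for end in range(start+1, len(s)+1): total_count += … (memo threaded through)
        let r := (List.range' (start+1) (s.toList.length - start)).foldl
          (fun (acc : Int × PySem.Dict Nat Int) e =>
            if pvCond s P start e then
              let t := pvCountA s P fuel e acc.2
              (acc.1 + t.1, t.2)
            else acc) ((0 : Int), memo)
        (r.1, r.2.insert start r.1)

def is_partition_possible (s : String) (patterns : List String) : Int :=
  (pvCountA s patterns (s.toList.length + 1) 0 PySem.Dict.empty).1

-- ===== PORT B =====
-- bottom-up: dp = [0]*(n+1); dp[n] = 1; for i in reversed(range(n)): dp[i] = sum(...); return dp[0]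
def is_partition_possible_alt (s : String) (patterns : List String) : Int :=
  let n := s.toList.length
  let dp0 := (List.replicate (n+1) (0 : Int)).set n 1
  let dp := (List.range n).reverse.foldl
    (fun dp i =>
      dp.set i (((List.range' (i+1) (n - i)).filter (fun e => pvCond s patterns i e)).map
        (fun e => dp.getD e 0)).sum) dp0
  dp.getD 0 0

-- ===== PRECONDITION & SPEC =====
def Spec_is_partition_possible (s : String) (patterns : List String) (out : Int) : Prop := out = is_partition_possible_alt s patterns
instance (s : String) (patterns : List String) (out : Int) : Decidable (Spec_is_partition_possible s patterns out) := by unfold Spec_is_partition_possible; infer_instance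

-- ===== CLAIM (what is proved, stated in full; the proofs are below) =====
def Claim_equal_is_partition_possible : Prop := ∀ (s : String) (patterns : List String), Dom_is_partition_possible s patterns → Spec_is_partition_possible s patterns (is_partition_possible s patterns)

-- ===== LEMMAS AND PROOFS =====

-- reference recurrence: pvG fuel start = number of ways to partition the suffix s[start:]
def pvG (s : String) (P : List String) : Nat → Nat → Int
  | 0, _ => 0
  | f+1, start =>
    if start = s.toList.length then 1
    else ((List.range' (start+1) (s.toList.length - start)).map
      (fun e => if pvCond s P start e then pvG s P f e else 0)).sum

lemma pvG_fuel (s : String) (P : List String) :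
    ∀ f1 f2 start, s.toList.length - start < f1 → s.toList.length - start < f2 →
      pvG s P f1 start = pvG s P f2 start := by
  intro f1
  induction f1 with
  | zero => intro f2 start h1 _; omega
  | succ f1 ih =>
    intro f2 start h1 h2
    match f2 with
    | 0 => omega
    | f2+1 =>
      simp only [pvG]
      split
      · rfl
      · rename_i hne
        congr 1
        apply List.map_congr_left
        intro e he
        rw [List.mem_range'] at he
        have := ih f2 e (by omega) (by omega)
        split
        · exact this
        · rfl

def pvGN (s : String) (P : List String) (start : Nat) : Int :=
  pvG s P (s.toList.length + 1) start

lemma pvGN_eq (s : String) (P : List String) (start : Nat) :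
    pvGN s P start = if start = s.toList.length then 1
    else ((List.range' (start+1) (s.toList.length - start)).map
      (fun e => if pvCond s P start e then pvGN s P e else 0)).sum := by
  unfold pvGN
  conv_lhs => rw [pvG]
  split
  · rfl
  · congr 1
    apply List.map_congr_left
    intro e he
    rw [List.mem_range'] at he
    have := pvG_fuel s P (s.toList.length) (s.toList.length + 1) e (by omega) (by omega)
    split
    · exact this
    · rfl

-- memo invariant: every stored value is the reference value
def pvInvA (s : String) (P : List String) (memo : PySem.Dict Nat Int) : Prop :=
  ∀ k v, memo.get? k = some v → v = pvGN s P k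

lemma pvFoldA (s : String) (P : List String) (fuel start : Nat)
    (IH : ∀ e memo, s.toList.length - e < fuel → pvInvA s P memo →
      (pvCountA s P fuel e memo).1 = pvGN s P e ∧ pvInvA s P (pvCountA s P fuel e memo).2) :
    ∀ (l : List Nat), (∀ e ∈ l, s.toList.length - e < fuel) →
      ∀ (acc : Int) (memo : PySem.Dict Nat Int), pvInvA s P memo →
      (l.foldl (fun (acc : Int × PySem.Dict Nat Int) e =>
          if pvCond s P start e then (acc.1 + (pvCountA s P fuel e acc.2).1, (pvCountA s P fuel e acc.2).2)
          else acc) (acc, memo)).1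
        = acc + (l.map (fun e => if pvCond s P start e then pvGN s P e else 0)).sum ∧
      pvInvA s P (l.foldl (fun (acc : Int × PySem.Dict Nat Int) e =>
          if pvCond s P start e then (acc.1 + (pvCountA s P fuel e acc.2).1, (pvCountA s P fuel e acc.2).2)
          else acc) (acc, memo)).2 := by
  intro l
  induction l with
  | nil => intro _ acc memo hinv; simp [hinv]
  | cons e rest ih =>
    intro hl acc memo hinv
    simp only [List.foldl_cons, List.map_cons, List.sum_cons]
    by_cases hc : pvCond s P start e = true
    · rw [if_pos hc, if_pos hc]
      obtain ⟨hv, hinv'⟩ := IH e memo (hl e (by simp)) hinv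
      have := ih (fun x hx => hl x (by simp [hx])) (acc + pvGN s P e)
        (pvCountA s P fuel e memo).2 hinv'
      rw [hv]
      exact ⟨by rw [this.1]; ring, this.2⟩
    · rw [if_neg hc, if_neg hc]
      have := ih (fun x hx => hl x (by simp [hx])) acc memo hinv
      exact ⟨by rw [this.1]; ring, this.2⟩

lemma pvA_correct (s : String) (P : List String) :
    ∀ fuel start memo, s.toList.length - start < fuel → pvInvA s P memo →
      (pvCountA s P fuel start memo).1 = pvGN s P start ∧
      pvInvA s P (pvCountA s P fuel start memo).2 := by
  intro fuel
  induction fuel with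
  | zero => intro start memo h _; omega
  | succ fuel ih =>
    intro start memo h hinv
    simp only [pvCountA]
    by_cases hs : start = s.toList.length
    · simp only [hs, if_true]
      refine ⟨?_, hinv⟩
      rw [pvGN_eq]
      simp
    · simp only [hs, if_false]
      match hm : memo.get? start with
      | some v =>
        simp only []
        exact ⟨(hinv start v hm), hinv⟩
      | none =>
        simp only []
        have hbound : ∀ e ∈ List.range' (start+1) (s.toList.length - start),
            s.toList.length - e < fuel := by
          intro e he; rw [List.mem_range'] at he; omega
        obtain ⟨h1, h2⟩ := pvFoldA s P fuel start ih
          (List.range' (start+1) (s.toList.length - start)) hbound 0 memo hinv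
        constructor
        · rw [h1, pvGN_eq, if_neg hs]; ring
        · intro k v hk
          rw [PySem.Dict.get?_insert] at hk
          split at hk
          · rename_i hks
            rw [hks]
            have hrv := Option.some.inj hk
            rw [← hrv, h1, pvGN_eq, if_neg hs]; ring
          · exact h2 k v hk

-- B-side helpers
lemma pvSumFilterMap (p : Nat → Bool) (f : Nat → Int) :
    ∀ (l : List Nat), ((l.filter p).map f).sum = (l.map (fun e => if p e then f e else 0)).sum := by
  intro l
  induction l with
  | nil => simp
  | cons e rest ih => by_cases hc : p e <;> simp [hc, ih]

lemma pvB_fold (s : String) (P : List String) :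
    ∀ (m : Nat), m ≤ s.toList.length → ∀ (dp : List Int),
      dp.length = s.toList.length + 1 →
      (∀ j, m ≤ j → j ≤ s.toList.length → dp.getD j 0 = pvGN s P j) →
      ∀ j, j ≤ s.toList.length →
        ((List.range m).reverse.foldl
          (fun dp i =>
            dp.set i (((List.range' (i+1) (s.toList.length - i)).filter (fun e => pvCond s P i e)).map
              (fun e => dp.getD e 0)).sum) dp).getD j 0 = pvGN s P j := by
  intro m
  induction m with
  | zero => intro _ dp _ hdp j hj; simpa using hdp j (Nat.zero_le j) hj
  | succ m ih =>
    intro hm dp hlen hdp j hj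
    have hrev : (List.range (m+1)).reverse = m :: (List.range m).reverse := by
      rw [List.range_succ]; simp
    rw [hrev, List.foldl_cons]
    set v := (((List.range' (m+1) (s.toList.length - m)).filter (fun e => pvCond s P m e)).map
      (fun e => dp.getD e 0)).sum with hv
    have hvG : v = pvGN s P m := by
      rw [hv, pvSumFilterMap]
      rw [pvGN_eq, if_neg (by omega)]
      congr 1
      apply List.map_congr_left
      intro e he
      rw [List.mem_range'] at he
      have := hdp e (by omega) (by omega)
      split
      · exact this
      · rfl
    apply ih (by omega) (dp.set m v)
    · simp [hlen]
    · intro k hk1 hk2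
      by_cases hkm : k = m
      · subst hkm
        rw [List.getD_eq_getElem?_getD, List.getElem?_set_self (by omega), Option.getD_some, hvG]
      · rw [List.getD_eq_getElem?_getD, List.getElem?_set_ne (by omega), ← List.getD_eq_getElem?_getD]
        exact hdp k (by omega) hk2
    · exact hj

lemma pvB_eq_G (s : String) (P : List String) : is_partition_possible_alt s P = pvGN s P 0 := by
  unfold is_partition_possible_alt
  apply pvB_fold s P (s.toList.length) (le_refl _)
  · simp
  · intro j hj1 hj2
    have hjn : j = s.toList.length := by omega
    subst hjn
    rw [List.getD_eq_getElem?_getD, List.getElem?_set_self (by simp), Option.getD_some]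
    rw [pvGN_eq]; simp
  · exact Nat.zero_le _

lemma pvA_eq_G (s : String) (P : List String) : is_partition_possible s P = pvGN s P 0 := by
  unfold is_partition_possible
  have := pvA_correct s P (s.toList.length + 1) 0 PySem.Dict.empty (by omega)
    (by intro k v hk; simp [PySem.Dict.get?_empty] at hk)
  exact this.1

-- ===== VERDICT (by name: the statement is the Claim_ definition above) =====
theorem is_partition_possible_spec : Claim_equal_is_partition_possible := by
  intro s patterns _
  unfold Spec_is_partition_possible
  rw [pvA_eq_G, pvB_eq_G]
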